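-- pv_equiv track=rewrite | github.com/Gnomeball/Everybody-Codes | 2024/day02.py | count_used_letters
-- ===== SOURCE A (Python) =====
-- def count_used_letters(word, runes):
--
--     # function to count how many letters in a word are used by a rune
--
--     def used_letters_by_rune(word, rune):
--         used = set()
--         rune_len = len(rune)
--         reversed_rune = rune[::-1]
--         for i in range(len(word)-rune_len+1):
--             snippet = word[i:i+rune_len]
--             if rune == snippet or reversed_rune == snippet:
--                 used = used.union(_ for _ in range(i, i+rune_len))
--         return used
--
--     used = set()
--     for rune in runes:
--         used = used.union(used_letters_by_rune(word, rune))
--     return len(used)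
-- ===== SOURCE B (Python) =====
-- def count_used_letters(word, runes):
--     # Position-major greedy interval sweep: at each index take the farthest
--     # match end and count only the newly covered cells past the current reach;
--     # no sets of indices are ever built.
--     total = 0
--     reach = 0
--     for i in range(len(word)):
--         end = 0
--         for rune in runes:
--             m = len(rune)
--             snippet = word[i:i+m]
--             if (snippet == rune or snippet == rune[::-1]) and i + m > end:
--                 end = i + m
--         if end > reach:
--             total += end - max(i, reach)
--             reach = end
--     return total
-- ===== Notes on version B (the rewrite author's own statement) =====
-- stated objective: alternative
-- what changed: A iterates rune-major and accumulates a growing set of covered indices, returning its size; B iterates position-major with a greedy interval sweep: at each index it computes the farthest match end and adds only the newly covered cells past the current reach, so no set of indices is ever built.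
import Mathlib
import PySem

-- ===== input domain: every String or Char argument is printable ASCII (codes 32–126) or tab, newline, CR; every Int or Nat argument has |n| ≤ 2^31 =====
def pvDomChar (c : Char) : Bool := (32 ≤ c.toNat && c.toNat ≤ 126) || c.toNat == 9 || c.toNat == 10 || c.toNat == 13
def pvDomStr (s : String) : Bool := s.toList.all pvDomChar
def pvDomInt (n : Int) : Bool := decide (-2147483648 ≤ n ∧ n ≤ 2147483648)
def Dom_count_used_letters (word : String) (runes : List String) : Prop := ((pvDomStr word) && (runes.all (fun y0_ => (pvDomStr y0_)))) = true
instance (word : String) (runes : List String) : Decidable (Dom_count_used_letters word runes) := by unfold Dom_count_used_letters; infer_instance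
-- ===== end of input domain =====

-- B replaces A's rune-major accumulation of a set of covered indices by a
-- position-major greedy interval sweep with a reach pointer (objective: alternative).

-- ===== PORT A =====
-- rune[::-1] (used by both Python versions verbatim)
def pyRev (s : String) : String := (PySem.Str.slice? s none none (-1)).getD ""

def used_letters_by_rune (word rune : String) : PySem.Set Int :=
  let rune_len := PySem.Str.len rune
  let reversed_rune := pyRev rune
  (PySem.List.pyRange 0 (PySem.Str.len word - rune_len + 1)).foldl
    (fun used i =>
      let snippet := PySem.Str.slice word (some i) (some (i + rune_len))
      if rune == snippet || reversed_rune == snippet then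
        PySem.Set.union used (PySem.List.pyRange i (i + rune_len))
      else used)
    PySem.Set.empty

def count_used_letters (word : String) (runes : List String) : Int :=
  PySem.Set.len
    (runes.foldl (fun used rune => PySem.Set.union used (used_letters_by_rune word rune))
      PySem.Set.empty)

-- ===== PORT B =====
-- inner loop of Source B: the farthest end of a match (rune or its reverse) at position i
def pvEnd (word : String) (runes : List String) (i : Int) : Int :=
  runes.foldl (fun e rune =>
    let m := PySem.Str.len rune
    let snippet := PySem.Str.slice word (some i) (some (i + m))
    if (snippet = rune ∨ snippet = pyRev rune) ∧ e < i + m then i + m else e) 0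

def count_used_letters_alt (word : String) (runes : List String) : Int :=
  ((PySem.List.pyRange 0 (PySem.Str.len word)).foldl
    (fun tr i =>
      let e := pvEnd word runes i
      if tr.2 < e then (tr.1 + (e - max i tr.2), e) else tr)
    ((0 : Int), (0 : Int))).1

-- ===== PRECONDITION & SPEC =====
def Spec_count_used_letters (word : String) (runes : List String) (out : Int) : Prop := out = count_used_letters_alt word runes
instance (word : String) (runes : List String) (out : Int) : Decidable (Spec_count_used_letters word runes out) := by unfold Spec_count_used_letters; infer_instance

-- ===== CLAIM (what is proved, stated in full; the proofs are below) =====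
def Claim_equal_count_used_letters : Prop := ∀ (word : String) (runes : List String), Dom_count_used_letters word runes → Spec_count_used_letters word runes (count_used_letters word runes)

-- ===== LEMMAS AND PROOFS =====

-- occB w p i: pattern p occurs in w at position i (Bool)
def occB (w p : List Char) (i : Nat) : Bool :=
  decide (p <+: w.drop i) && decide (i + p.length ≤ w.length)

-- coveredB w rs j: position j is covered by an occurrence of some rune of rs or its reverse
def coveredB (w : List Char) (rs : List String) (j : Nat) : Bool :=
  rs.any (fun r => (List.range (w.length + 1)).any (fun i =>
    (occB w r.toList i || occB w r.toList.reverse i) && decide (i ≤ j) && decide (j < i + r.toList.length)))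

-- covB: same, restricted to occurrences starting at position ≥ k
def covB (w : List Char) (rs : List String) (k j : Nat) : Bool :=
  rs.any (fun r => (List.range (w.length + 1)).any (fun i =>
    (occB w r.toList i || occB w r.toList.reverse i) && decide (k ≤ i) && decide (i ≤ j) && decide (j < i + r.toList.length)))

theorem pv_coveredB_eq_covB (w : List Char) (rs : List String) (j : Nat) :
    coveredB w rs j = covB w rs 0 j := by
  simp [coveredB, covB]

theorem pv_str_beq_iff (s t : String) : (s == t) = true ↔ s.toList = t.toList := by
  constructor
  · intro h; exact congrArg String.toList (beq_iff_eq.mp h)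
  · intro h
    exact beq_iff_eq.mpr
      (by rw [← String.ofList_toList (s := s), ← String.ofList_toList (s := t), h])

theorem pv_str_eq_iff (s t : String) : s = t ↔ s.toList = t.toList := by
  constructor
  · intro h; exact congrArg String.toList h
  · intro h
    rw [← String.ofList_toList (s := s), ← String.ofList_toList (s := t), h]

theorem pv_occB_true (w p : List Char) (i : Nat) :
    occB w p i = true ↔ (p <+: w.drop i ∧ i + p.length ≤ w.length) := by
  simp [occB]

theorem pv_pyRev_toList (s : String) : (pyRev s).toList = s.toList.reverse := by
  simp [pyRev, PySem.Str.slice?_none_none_neg_one, String.toList_ofList]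

-- ===== A-side lemmas =====

theorem pv_foldl_union_mem {α β : Type} [BEq β] [LawfulBEq β] (f : α → PySem.Set β) :
    ∀ (l : List α) (s0 : PySem.Set β) (x : β),
    (x ∈ l.foldl (fun s r => PySem.Set.union s (f r)) s0 ↔ x ∈ s0 ∨ ∃ r ∈ l, x ∈ f r) := by
  intro l
  induction l with
  | nil => simp [List.foldl]
  | cons r t ih =>
    intro s0 x
    simp only [List.foldl, ih, PySem.Set.mem_union, List.mem_cons]
    constructor
    · rintro ((h | h) | ⟨a, ha, hx⟩)
      · exact Or.inl h
      · exact Or.inr ⟨r, Or.inl rfl, h⟩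
      · exact Or.inr ⟨a, Or.inr ha, hx⟩
    · rintro (h | ⟨a, (rfl | ha), hx⟩)
      · exact Or.inl (Or.inl h)
      · exact Or.inl (Or.inr hx)
      · exact Or.inr ⟨a, ha, hx⟩

theorem pv_foldl_union_nodup {α β : Type} [BEq β] [LawfulBEq β] (f : α → PySem.Set β) :
    ∀ (l : List α) (s0 : PySem.Set β), s0.Nodup →
    (l.foldl (fun s r => PySem.Set.union s (f r)) s0).Nodup := by
  intro l
  induction l with
  | nil => intro s0 h; exact h
  | cons r t ih =>
    intro s0 h
    exact ih _ (PySem.Set.nodup_union _ _ h)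

theorem pv_foldl_union_if_mem {α β : Type} [BEq β] [LawfulBEq β] (p : α → Bool) (g : α → List β) :
    ∀ (l : List α) (s0 : PySem.Set β) (x : β),
    (x ∈ l.foldl (fun s a => if p a then PySem.Set.union s (g a) else s) s0 ↔
      x ∈ s0 ∨ ∃ a ∈ l, p a ∧ x ∈ g a) := by
  intro l
  induction l with
  | nil => simp [List.foldl]
  | cons r t ih =>
    intro s0 x
    simp only [List.foldl, List.mem_cons]
    by_cases hp : p r
    · simp only [hp, if_pos, ih, PySem.Set.mem_union]
      constructor
      · rintro ((h | h) | ⟨a, ha, hpa, hx⟩)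
        · exact Or.inl h
        · exact Or.inr ⟨r, Or.inl rfl, hp, h⟩
        · exact Or.inr ⟨a, Or.inr ha, hpa, hx⟩
      · rintro (h | ⟨a, (rfl | ha), hpa, hx⟩)
        · exact Or.inl (Or.inl h)
        · exact Or.inl (Or.inr hx)
        · exact Or.inr ⟨a, ha, hpa, hx⟩
    · simp only [hp, ih, Bool.false_eq_true]
      constructor
      · rintro (h | ⟨a, ha, hpa, hx⟩)
        · exact Or.inl h
        · exact Or.inr ⟨a, Or.inr ha, hpa, hx⟩
      · rintro (h | ⟨a, (rfl | ha), hpa, hx⟩)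
        · exact Or.inl h
        · exact absurd hpa hp
        · exact Or.inr ⟨a, ha, hpa, hx⟩

theorem pv_ublr_mem (word r : String) (x : Int) :
    x ∈ used_letters_by_rune word r ↔
      ∃ i : Nat, (occB word.toList r.toList i || occB word.toList r.toList.reverse i)
        ∧ (i : Int) ≤ x ∧ x < (i : Int) + r.toList.length := by
  have hsnip : ∀ i : Nat, PySem.Str.slice word (some (i : Int)) (some ((i : Int) + PySem.Str.len r))
      = String.ofList ((word.toList.drop i).take r.toList.length) := by
    intro i
    simp only [PySem.Str.slice, PySem.Chars.slice, PySem.Str.len]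
    rw [PySem.List.slice_natCast_add]
  have hbeq : ∀ (s : String) (i : Nat),
      (s == PySem.Str.slice word (some (i : Int)) (some ((i : Int) + PySem.Str.len r))) = true
        ↔ s.toList = (word.toList.drop i).take r.toList.length := by
    intro s i
    rw [hsnip i, pv_str_beq_iff, String.toList_ofList]
  simp only [used_letters_by_rune]
  rw [pv_foldl_union_if_mem
    (p := fun i => (r == PySem.Str.slice word (some i) (some (i + PySem.Str.len r))
      || pyRev r == PySem.Str.slice word (some i) (some (i + PySem.Str.len r))))
    (g := fun i => PySem.List.pyRange i (i + PySem.Str.len r))]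
  have hempty : ¬ x ∈ (PySem.Set.empty : PySem.Set Int) := List.not_mem_nil
  constructor
  · rintro (hemp | ⟨a, ha, hcond, hx⟩)
    · exact absurd hemp hempty
    · rw [PySem.List.mem_pyRange_iff_of_pos (by norm_num)] at ha hx
      obtain ⟨ha0, ha1, -⟩ := ha
      obtain ⟨hx0, hx1, -⟩ := hx
      lift a to Nat using ha0 with i
      simp only [PySem.Str.len] at ha1 hx0 hx1
      have hbound : i + r.toList.length ≤ word.toList.length := by omega
      refine ⟨i, ?_, by exact_mod_cast hx0, by push_cast; push_cast at hx1; omega⟩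
      rw [Bool.or_eq_true_iff] at hcond ⊢
      rcases hcond with hcond | hcond
      · exact Or.inl ((pv_occB_true _ _ _).mpr
          ⟨(List.prefix_iff_eq_take).mpr ((hbeq r i).mp hcond), hbound⟩)
      · refine Or.inr ((pv_occB_true _ _ _).mpr ⟨?_, by rwa [List.length_reverse]⟩)
        rw [List.prefix_iff_eq_take, List.length_reverse]
        rw [← pv_pyRev_toList]
        exact (hbeq (pyRev r) i).mp hcond
  · rintro ⟨i, hor, hx0, hx1⟩
    right
    have hbound : i + r.toList.length ≤ word.toList.length := by
      rcases Bool.or_eq_true_iff.mp hor with h | h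
      · exact ((pv_occB_true _ _ _).mp h).2
      · have := ((pv_occB_true _ _ _).mp h).2
        rwa [List.length_reverse] at this
    refine ⟨(i : Int), ?_, ?_, ?_⟩
    · rw [PySem.List.mem_pyRange_iff_of_pos (by norm_num)]
      simp only [PySem.Str.len]
      refine ⟨by omega, by push_cast; omega, one_dvd _⟩
    · rw [Bool.or_eq_true_iff]
      rcases Bool.or_eq_true_iff.mp hor with h | h
      · exact Or.inl ((hbeq r i).mpr ((List.prefix_iff_eq_take).mp ((pv_occB_true _ _ _).mp h).1))
      · refine Or.inr ((hbeq (pyRev r) i).mpr ?_)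
        rw [pv_pyRev_toList]
        have := (List.prefix_iff_eq_take).mp ((pv_occB_true _ _ _).mp h).1
        rwa [List.length_reverse] at this
    · rw [PySem.List.mem_pyRange_iff_of_pos (by norm_num)]
      simp only [PySem.Str.len]
      refine ⟨hx0, by push_cast; push_cast at hx1; omega, one_dvd _⟩

theorem pv_A_mem (word : String) (runes : List String) (x : Int) :
    x ∈ (runes.foldl (fun used rune => PySem.Set.union used (used_letters_by_rune word rune))
          PySem.Set.empty) ↔
      ∃ j : Nat, j < word.toList.length ∧ coveredB word.toList runes j ∧ x = (j : Int) := by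
  rw [pv_foldl_union_mem (f := fun rune => used_letters_by_rune word rune)]
  have hempty : ¬ x ∈ (PySem.Set.empty : PySem.Set Int) := List.not_mem_nil
  constructor
  · rintro (hemp | ⟨r, hr, hx⟩)
    · exact absurd hemp hempty
    · rw [pv_ublr_mem] at hx
      obtain ⟨i, hor, hx0, hx1⟩ := hx
      have hbound : i + r.toList.length ≤ word.toList.length := by
        rcases Bool.or_eq_true_iff.mp hor with h | h
        · exact ((pv_occB_true _ _ _).mp h).2
        · have := ((pv_occB_true _ _ _).mp h).2
          rwa [List.length_reverse] at this
      refine ⟨x.toNat, by omega, ?_, by omega⟩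
      simp only [coveredB, List.any_eq_true, List.mem_range, Bool.and_eq_true, decide_eq_true_eq]
      exact ⟨r, hr, i, by omega, ⟨⟨hor, by omega⟩, by omega⟩⟩
  · rintro ⟨j, hj, hcov, rfl⟩
    right
    simp only [coveredB, List.any_eq_true, List.mem_range, Bool.and_eq_true,
      decide_eq_true_eq] at hcov
    obtain ⟨r, hr, i, hi, ⟨⟨hor, hij⟩, hji⟩⟩ := hcov
    refine ⟨r, hr, ?_⟩
    rw [pv_ublr_mem]
    exact ⟨i, hor, by omega, by omega⟩

theorem pv_key_count (S : List Int) (n : Nat) (Q : Nat → Bool) (hnd : S.Nodup)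
    (h : ∀ x : Int, x ∈ S ↔ ∃ j : Nat, j < n ∧ Q j ∧ x = (j : Int)) :
    S.length = (List.range n).countP Q := by
  have hinj : Function.Injective (fun j : Nat => (j : Int)) := fun a b hab => by
    simpa using hab
  have hndT : (((List.range n).filter Q).map (fun j : Nat => (j : Int))).Nodup :=
    List.Nodup.map hinj ((List.nodup_range).filter _)
  have hperm : S.Perm (((List.range n).filter Q).map (fun j : Nat => (j : Int))) := by
    rw [List.perm_ext_iff_of_nodup hnd hndT]
    intro a
    rw [h a]
    simp only [List.mem_map, List.mem_filter, List.mem_range]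
    exact ⟨fun ⟨j, h1, h2, h3⟩ => ⟨j, ⟨h1, h2⟩, h3.symm⟩,
      fun ⟨j, ⟨h1, h2⟩, h3⟩ => ⟨j, h1, h2, h3.symm⟩⟩
  rw [hperm.length_eq, List.length_map, ← List.countP_eq_length_filter]

-- ===== B-side lemmas =====

theorem pv_take_eq_iff (w p : List Char) (i : Nat) (hi : i ≤ w.length) :
    ((w.drop i).take p.length = p) ↔ occB w p i = true := by
  rw [pv_occB_true]
  constructor
  · intro h
    have hlen := congrArg List.length h
    simp only [List.length_take, List.length_drop] at hlen
    exact ⟨h ▸ List.take_prefix _ _, by omega⟩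
  · rintro ⟨hpre, _⟩
    exact (List.prefix_iff_eq_take.mp hpre).symm

theorem pv_match_iff (word r : String) (i : Nat) (hi : i ≤ word.toList.length) :
    ((PySem.Str.slice word (some (i : Int)) (some ((i : Int) + PySem.Str.len r)) = r) ∨
     (PySem.Str.slice word (some (i : Int)) (some ((i : Int) + PySem.Str.len r)) = pyRev r))
    ↔ (occB word.toList r.toList i || occB word.toList r.toList.reverse i) = true := by
  have hsnip : PySem.Str.slice word (some (i : Int)) (some ((i : Int) + PySem.Str.len r))
      = String.ofList ((word.toList.drop i).take r.toList.length) := by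
    simp only [PySem.Str.slice, PySem.Chars.slice, PySem.Str.len]
    rw [PySem.List.slice_natCast_add]
  rw [Bool.or_eq_true_iff]
  rw [hsnip, pv_str_eq_iff, pv_str_eq_iff, String.toList_ofList, pv_pyRev_toList]
  constructor
  · rintro (h | h)
    · exact Or.inl ((pv_take_eq_iff _ _ _ hi).mp h)
    · refine Or.inr ((pv_take_eq_iff _ _ _ hi).mp ?_)
      rw [List.length_reverse]
      exact h
  · rintro (h | h)
    · exact Or.inl ((pv_take_eq_iff _ _ _ hi).mpr h)
    · have := (pv_take_eq_iff word.toList r.toList.reverse i hi).mpr h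
      rw [List.length_reverse] at this
      exact Or.inr this

theorem pv_len_eq (s : String) : PySem.Str.len s = (s.toList.length : Int) := by
  simp [PySem.Str.len]

theorem pv_end_aux (word : String) (i : Nat) (hi : i ≤ word.toList.length) :
    ∀ (rs : List String) (a : Int),
    (rs.foldl (fun e rune =>
        let m := PySem.Str.len rune
        let snippet := PySem.Str.slice word (some (i : Int)) (some ((i : Int) + m))
        if (snippet = rune ∨ snippet = pyRev rune) ∧ e < (i : Int) + m then (i : Int) + m else e) a
      = a ∨
     ∃ r ∈ rs, (occB word.toList r.toList i || occB word.toList r.toList.reverse i) = true ∧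
       rs.foldl (fun e rune =>
        let m := PySem.Str.len rune
        let snippet := PySem.Str.slice word (some (i : Int)) (some ((i : Int) + m))
        if (snippet = rune ∨ snippet = pyRev rune) ∧ e < (i : Int) + m then (i : Int) + m else e) a
        = (i : Int) + r.toList.length) ∧
    a ≤ rs.foldl (fun e rune =>
        let m := PySem.Str.len rune
        let snippet := PySem.Str.slice word (some (i : Int)) (some ((i : Int) + m))
        if (snippet = rune ∨ snippet = pyRev rune) ∧ e < (i : Int) + m then (i : Int) + m else e) a ∧
    ∀ r ∈ rs, (occB word.toList r.toList i || occB word.toList r.toList.reverse i) = true →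
      (i : Int) + r.toList.length ≤ rs.foldl (fun e rune =>
        let m := PySem.Str.len rune
        let snippet := PySem.Str.slice word (some (i : Int)) (some ((i : Int) + m))
        if (snippet = rune ∨ snippet = pyRev rune) ∧ e < (i : Int) + m then (i : Int) + m else e) a := by
  intro rs
  induction rs with
  | nil =>
    intro a
    exact ⟨Or.inl rfl, le_refl a, fun r hr => absurd hr List.not_mem_nil⟩
  | cons r t ih =>
    intro a
    simp only [List.foldl_cons, pv_len_eq] at ih ⊢
    have hmatch : ((PySem.Str.slice word (some (i : Int))
          (some ((i : Int) + (r.toList.length : Int))) = r ∨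
        PySem.Str.slice word (some (i : Int))
          (some ((i : Int) + (r.toList.length : Int))) = pyRev r))
        ↔ (occB word.toList r.toList i || occB word.toList r.toList.reverse i) = true := by
      rw [← pv_len_eq]
      exact pv_match_iff word r i hi
    by_cases hc : (occB word.toList r.toList i || occB word.toList r.toList.reverse i) = true ∧
        a < (i : Int) + (r.toList.length : Int)
    · rw [if_pos ⟨hmatch.mpr hc.1, hc.2⟩]
      obtain ⟨h1, h2, h3⟩ := ih ((i : Int) + (r.toList.length : Int))
      refine ⟨?_, le_trans (le_of_lt hc.2) h2, ?_⟩
      · rcases h1 with h1 | ⟨r', hr', hm', he'⟩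
        · exact Or.inr ⟨r, List.mem_cons_self, hc.1, h1⟩
        · exact Or.inr ⟨r', List.mem_cons_of_mem _ hr', hm', he'⟩
      · intro r' hr' hm'
        rcases List.mem_cons.mp hr' with rfl | hr'
        · exact le_trans (le_refl _) h2
        · exact h3 r' hr' hm'
    · rw [if_neg (fun hx => hc ⟨hmatch.mp hx.1, hx.2⟩)]
      obtain ⟨h1, h2, h3⟩ := ih a
      refine ⟨?_, h2, ?_⟩
      · rcases h1 with h1 | ⟨r', hr', hm', he'⟩
        · exact Or.inl h1
        · exact Or.inr ⟨r', List.mem_cons_of_mem _ hr', hm', he'⟩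
      · intro r' hr' hm'
        rcases List.mem_cons.mp hr' with rfl | hr'
        · -- condition failed but match holds: a ≥ i + len
          have : ¬ a < (i : Int) + (r'.toList.length : Int) := fun hlt => hc ⟨hm', hlt⟩
          exact le_trans (by omega) h2
        · exact h3 r' hr' hm'

theorem pv_end_spec (word : String) (runes : List String) (i : Nat)
    (hi : i ≤ word.toList.length) :
    (pvEnd word runes (i : Int) = 0 ∨
      ∃ r ∈ runes, (occB word.toList r.toList i || occB word.toList r.toList.reverse i) = true ∧
        pvEnd word runes (i : Int) = (i : Int) + r.toList.length) ∧
    (0 : Int) ≤ pvEnd word runes (i : Int) ∧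
    ∀ r ∈ runes, (occB word.toList r.toList i || occB word.toList r.toList.reverse i) = true →
      (i : Int) + r.toList.length ≤ pvEnd word runes (i : Int) := by
  have h := pv_end_aux word i hi runes 0
  simpa only [pvEnd] using h

theorem pv_end_le (word : String) (runes : List String) (i : Nat)
    (hi : i ≤ word.toList.length) :
    pvEnd word runes (i : Int) ≤ (word.toList.length : Int) := by
  obtain ⟨h1, h2, -⟩ := pv_end_spec word runes i hi
  rcases h1 with h1 | ⟨r, hr, hm, he⟩
  · rw [h1]; exact_mod_cast Nat.zero_le _
  · rw [he]
    have hb : i + r.toList.length ≤ word.toList.length := by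
      rcases Bool.or_eq_true_iff.mp hm with h | h
      · exact ((pv_occB_true _ _ _).mp h).2
      · have := ((pv_occB_true _ _ _).mp h).2
        rwa [List.length_reverse] at this
    push_cast
    omega

theorem pv_covered_at (word : String) (runes : List String) (i j : Nat)
    (hi : i ≤ word.toList.length) :
    ((∃ r ∈ runes, (occB word.toList r.toList i || occB word.toList r.toList.reverse i) = true ∧
        i ≤ j ∧ j < i + r.toList.length)
      ↔ (i ≤ j ∧ (j : Int) < pvEnd word runes (i : Int))) := by
  obtain ⟨h1, h2, h3⟩ := pv_end_spec word runes i hi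
  constructor
  · rintro ⟨r, hr, hm, hij, hjl⟩
    refine ⟨hij, ?_⟩
    have := h3 r hr hm
    push_cast at this ⊢
    omega
  · rintro ⟨hij, hjE⟩
    rcases h1 with h1 | ⟨r, hr, hm, he⟩
    · rw [h1] at hjE; omega
    · rw [he] at hjE
      exact ⟨r, hr, hm, hij, by push_cast at hjE; omega⟩

theorem pv_covB_iff (w : List Char) (rs : List String) (k j : Nat) :
    covB w rs k j = true ↔
      ∃ r ∈ rs, ∃ i : Nat, i ≤ w.length ∧ k ≤ i ∧ i ≤ j ∧ j < i + r.toList.length ∧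
        (occB w r.toList i || occB w r.toList.reverse i) = true := by
  simp only [covB, List.any_eq_true, List.mem_range, Bool.and_eq_true, decide_eq_true_eq]
  constructor
  · rintro ⟨r, hr, i, hi, ⟨⟨⟨hm, hki⟩, hij⟩, hjl⟩⟩
    exact ⟨r, hr, i, by omega, hki, hij, hjl, hm⟩
  · rintro ⟨r, hr, i, hi, hki, hij, hjl, hm⟩
    exact ⟨r, hr, i, by omega, ⟨⟨⟨hm, hki⟩, hij⟩, hjl⟩⟩

theorem pv_cnt_interval (a b : Int) (n : Nat) (ha : 0 ≤ a) :
    ((List.range n).countP (fun (j : Nat) => decide (a ≤ (j : Int)) && decide ((j : Int) < b)) : Int)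
      = max 0 (min b (n : Int) - a) := by
  induction n with
  | zero =>
    simp only [List.range_zero, List.countP_nil, Nat.cast_zero]
    omega
  | succ n ih =>
    rw [List.range_succ, List.countP_append]
    simp only [List.countP_cons, List.countP_nil, Bool.and_eq_true, decide_eq_true_eq]
    push_cast
    rw [ih]
    split_ifs with h
    · push_cast
      omega
    · push_cast
      omega

theorem pv_countP_or {α : Type} (l : List α) (p q : α → Bool)
    (h : ∀ x ∈ l, ¬ (p x = true ∧ q x = true)) :
    l.countP (fun x => p x || q x) = l.countP p + l.countP q := by
  induction l with
  | nil => simp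
  | cons x t ih =>
    rw [List.countP_cons, List.countP_cons, List.countP_cons,
      ih (fun y hy => h y (List.mem_cons_of_mem _ hy))]
    have := h x List.mem_cons_self
    cases hp : p x <;> cases hq : q x <;> simp_all <;> omega

theorem pv_sweep_nil (word : String) (runes : List String) (k : Nat)
    (hk : word.toList.length ≤ k) (t c : Int) :
    ((PySem.List.pyRange (k : Int) (word.toList.length : Int)).foldl
        (fun tr i =>
          let e := pvEnd word runes i
          if tr.2 < e then (tr.1 + (e - max i tr.2), e) else tr)
        (t, c)).1
      = t + ((List.range word.toList.length).countP
          (fun (j : Nat) => decide (c ≤ (j : Int)) && covB word.toList runes k j) : Int) := by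
  rw [PySem.List.pyRange_one_eq_nil (by exact_mod_cast hk)]
  simp only [List.foldl_nil]
  have hz : (List.range word.toList.length).countP
      (fun (j : Nat) => decide (c ≤ (j : Int)) && covB word.toList runes k j) = 0 := by
    rw [List.countP_eq_zero]
    intro j hj
    rw [List.mem_range] at hj
    simp only [Bool.and_eq_true, decide_eq_true_eq, not_and]
    intro _
    intro hcov
    obtain ⟨r, hr, i, hi, hki, hij, hjl, hm⟩ := (pv_covB_iff _ _ _ _).mp hcov
    omega
  rw [hz]
  simp

theorem pv_sweep (word : String) (runes : List String) :
    ∀ (fuel k : Nat), word.toList.length - k ≤ fuel → ∀ (t c : Int), 0 ≤ c →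
    ((PySem.List.pyRange (k : Int) (word.toList.length : Int)).foldl
        (fun tr i =>
          let e := pvEnd word runes i
          if tr.2 < e then (tr.1 + (e - max i tr.2), e) else tr)
        (t, c)).1
      = t + ((List.range word.toList.length).countP
          (fun (j : Nat) => decide (c ≤ (j : Int)) && covB word.toList runes k j) : Int) := by
  intro fuel
  induction fuel with
  | zero =>
    intro k hf t c hc
    exact pv_sweep_nil word runes k (by omega) t c
  | succ fuel ih =>
    intro k hf t c hc
    by_cases hk : k < word.toList.length
    case neg => exact pv_sweep_nil word runes k (by omega) t c
    rw [PySem.List.pyRange_one_cons (by exact_mod_cast hk)]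
    rw [List.foldl_cons]
    have hk1 : ((k : Int) + 1) = ((k + 1 : Nat) : Int) := by push_cast; ring
    obtain ⟨hEd, hE0, hEub⟩ := pv_end_spec word runes k (by omega)
    have hEle := pv_end_le word runes k (by omega)
    show ((PySem.List.pyRange ((k : Int) + 1) (word.toList.length : Int)).foldl _
        (if c < pvEnd word runes (k : Int) then
          (t + (pvEnd word runes (k : Int) - max (k : Int) c), pvEnd word runes (k : Int))
        else (t, c))).1 = _
    by_cases hce : c < pvEnd word runes (k : Int)
    · rw [if_pos hce]
      set E := pvEnd word runes (k : Int) with hEdef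
      have hEk : (k : Int) ≤ E := by
        rcases hEd with h | ⟨r, hr, hm, he⟩
        · omega
        · rw [he]; push_cast; omega
      rw [hk1, ih (k + 1) (by omega) _ E (by omega)]
      have hpt : ∀ j ∈ List.range word.toList.length,
          ((decide (c ≤ (j : Int)) && covB word.toList runes k j) = true ↔
           ((decide (max (k : Int) c ≤ (j : Int)) && decide ((j : Int) < E)) ||
            (decide (E ≤ (j : Int)) && covB word.toList runes (k + 1) j)) = true) := by
        intro j hj
        rw [List.mem_range] at hj
        simp only [Bool.or_eq_true, Bool.and_eq_true, decide_eq_true_eq]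
        constructor
        · rintro ⟨hcj, hcov⟩
          obtain ⟨r, hr, i, hi, hki, hij, hjl, hm⟩ := (pv_covB_iff _ _ _ _).mp hcov
          by_cases hjE : (j : Int) < E
          · exact Or.inl ⟨by omega, hjE⟩
          · refine Or.inr ⟨by omega, ?_⟩
            rcases Nat.lt_or_ge k (i) with hki' | hki'
            · exact (pv_covB_iff _ _ _ _).mpr ⟨r, hr, i, hi, by omega, hij, hjl, hm⟩
            · -- i = k: covered at k, so j < E, contradiction
              have hik : i = k := by omega
              subst hik
              have := (pv_covered_at word runes i j (by omega)).mp ⟨r, hr, hm, hij, hjl⟩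
              exact absurd this.2 hjE
        · rintro (⟨hmx, hjE⟩ | ⟨hEj, hcov⟩)
          · refine ⟨by omega, ?_⟩
            have hkj : k ≤ j := by omega
            obtain ⟨r, hr, hm, hij, hjl⟩ :=
              (pv_covered_at word runes k j (by omega)).mpr ⟨hkj, hjE⟩
            exact (pv_covB_iff _ _ _ _).mpr ⟨r, hr, k, by omega, le_refl k, hij, hjl, hm⟩
          · refine ⟨by omega, ?_⟩
            obtain ⟨r, hr, i, hi, hki, hij, hjl, hm⟩ := (pv_covB_iff _ _ _ _).mp hcov
            exact (pv_covB_iff _ _ _ _).mpr ⟨r, hr, i, hi, by omega, hij, hjl, hm⟩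
      rw [List.countP_congr (fun x hx => hpt x hx)]
      rw [pv_countP_or _ _ _ (by
        intro x hx
        simp only [Bool.and_eq_true, decide_eq_true_eq]
        rintro ⟨⟨-, h1⟩, h2, -⟩
        omega)]
      rw [Nat.cast_add, pv_cnt_interval _ _ _ (by omega)]
      have : max 0 (min E (word.toList.length : Int) - max (k : Int) c) = E - max (k : Int) c := by
        omega
      rw [this]
      ring
    · rw [if_neg hce]
      rw [hk1, ih (k + 1) (by omega) t c hc]
      have hEc : pvEnd word runes (k : Int) ≤ c := by omega
      congr 2
      apply List.countP_congr
      intro j hj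
      rw [List.mem_range] at hj
      simp only [Bool.and_eq_true, decide_eq_true_eq]
      constructor
      · rintro ⟨hcj, hcov⟩
        refine ⟨hcj, ?_⟩
        obtain ⟨r, hr, i, hi, hki, hij, hjl, hm⟩ := (pv_covB_iff _ _ _ _).mp hcov
        exact (pv_covB_iff _ _ _ _).mpr ⟨r, hr, i, hi, by omega, hij, hjl, hm⟩
      · rintro ⟨hcj, hcov⟩
        refine ⟨hcj, ?_⟩
        obtain ⟨r, hr, i, hi, hki, hij, hjl, hm⟩ := (pv_covB_iff _ _ _ _).mp hcov
        rcases Nat.lt_or_ge k i with hki' | hki'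
        · exact (pv_covB_iff _ _ _ _).mpr ⟨r, hr, i, hi, by omega, hij, hjl, hm⟩
        · have hik : i = k := by omega
          subst hik
          have := (pv_covered_at word runes i j (by omega)).mp ⟨r, hr, hm, hij, hjl⟩
          exact absurd this.2 (by omega)

-- ===== VERDICT (by name: the statement is the Claim_ definition above) =====
theorem count_used_letters_spec : Claim_equal_count_used_letters := by
  intro word runes _
  unfold Spec_count_used_letters
  have hndA : (runes.foldl (fun used rune => PySem.Set.union used (used_letters_by_rune word rune))
      PySem.Set.empty).Nodup :=
    pv_foldl_union_nodup (f := fun rune => used_letters_by_rune word rune) runes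
      PySem.Set.empty List.nodup_nil
  have hA := pv_key_count _ word.toList.length (fun j => coveredB word.toList runes j) hndA
    (pv_A_mem word runes)
  have hB : count_used_letters_alt word runes
      = ((List.range word.toList.length).countP
          (fun j => coveredB word.toList runes j) : Int) := by
    have hs := pv_sweep word runes word.toList.length 0 (by omega) 0 0 (le_refl 0)
    simp only [count_used_letters_alt]
    rw [show PySem.Str.len word = (word.toList.length : Int) from pv_len_eq word]
    rw [show (0 : Int) = ((0 : Nat) : Int) from rfl] at hs ⊢
    rw [hs]
    rw [show (((0:Nat) : Int) + ((List.range word.toList.length).countP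
        (fun (j : Nat) => decide (((0:Nat):Int) ≤ (j : Int)) && covB word.toList runes 0 j) : Int))
      = ((List.range word.toList.length).countP
        (fun (j : Nat) => decide (((0:Nat):Int) ≤ (j : Int)) && covB word.toList runes 0 j) : Int) by
        push_cast; ring]
    congr 1
    apply List.countP_congr
    intro j hj
    rw [← pv_coveredB_eq_covB]
    simp
  simp only [count_used_letters, PySem.Set.len]
  rw [hA, hB]
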